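-- pv_equiv track=rewrite | github.com/JeremyF-141592/CoEvolution | IPCA/IPCA_core.py | non_dominated
-- ===== SOURCE A (Python) =====
-- def non_dominated(elements, scores):
--     if len(elements) == 0:
--         return elements
--     assert(len(elements) == len(scores))
--     res = list()
--     for i in range(len(elements)):
--         dominated = False
--         for j in range(len(elements)):
--             if i != j and dominates(scores[j], scores[i]):
--                 dominated = True
--                 break
--         if not dominated:
--             res.append(elements[i])
--     return res
--
-- def dominates(a, b):
--     """Return true if a strictly dominate b"""
--     equals = True
--     for i in range(len(a)):
--         equals = equals and a[i] == b[i]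
--         if not a[i] and b[i]:
--             return False
--     if equals:
--         return False
--     return True
-- ===== SOURCE B (Python) =====
-- def dominates(a, b):
--     """a strictly dominates b: a covers everything b covers and differs."""
--     return a != b and all(x or not y for x, y in zip(a, b))
--
--
-- def non_dominated(elements, scores):
--     if len(elements) == 0:
--         return elements
--     assert len(elements) == len(scores)
--     res = []  # current non-dominated survivors as (element, score) pairs
--     for e, s in zip(elements, scores):
--         if any(dominates(rs, s) for _, rs in res):
--             continue
--         res = [(re, rs) for re, rs in res if not dominates(s, rs)]
--         res.append((e, s))
--     return [e for e, _ in res]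
-- ===== Notes on version B (the rewrite author's own statement) =====
-- stated objective: alternative
-- what changed: Replaces the all-pairs index scan (each element tested against every other) by an incremental skyline: a single pass keeps a running list of survivors, skipping elements dominated by a survivor and evicting survivors dominated by the newcomer.
-- outside the precondition, e.g. on non_dominated([1, 2], [[False, True], [True]]): A returns [2], B returns [2]
import Mathlib
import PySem

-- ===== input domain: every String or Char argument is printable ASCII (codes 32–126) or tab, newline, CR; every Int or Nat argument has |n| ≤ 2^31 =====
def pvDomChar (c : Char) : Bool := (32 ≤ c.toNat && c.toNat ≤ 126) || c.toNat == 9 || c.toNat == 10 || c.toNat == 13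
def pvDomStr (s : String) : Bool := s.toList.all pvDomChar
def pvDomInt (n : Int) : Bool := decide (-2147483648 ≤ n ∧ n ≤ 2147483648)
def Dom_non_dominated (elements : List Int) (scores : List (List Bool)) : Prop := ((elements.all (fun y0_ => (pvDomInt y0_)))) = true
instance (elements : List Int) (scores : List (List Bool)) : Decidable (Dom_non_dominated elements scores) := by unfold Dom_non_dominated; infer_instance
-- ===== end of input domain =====

-- B replaces A's all-pairs index scan by a one-pass incremental skyline of survivors; same return value.

-- ===== PORT A =====
-- dominates(a, b): `for i in range(len(a))` reading a[i], b[i], as lockstep structural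
-- recursion; the `_ :: _, []` arm is where Python reads b[i] out of range (IndexError,
-- or an accidental value when its `and` short-circuits skip the read) — unreachable
-- under Pre_non_dominated, which makes all score rows the same length.
def dominatesAux : List Bool → List Bool → Bool → Bool
  | [], _, equals => if equals then false else true
  | ai :: a, bi :: b, equals =>
      let equals' := equals && (ai == bi)
      if !ai && bi then false else dominatesAux a b equals'
  | _ :: _, [], _ => false

def dominatesA (a b : List Bool) : Bool := dominatesAux a b true

def non_dominated (elements : List Int) (scores : List (List Bool)) : List Int :=
  if elements.length = 0 then elements
  else
    -- assert(len(elements) == len(scores)): holds under Pre_non_dominated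
    (List.range elements.length).foldl (fun res i =>
      -- scores[j], scores[i], elements[i]: indices are in range (i, j < len; lengths equal under Pre_)
      let dominated := (List.range elements.length).any (fun j =>
        decide (i ≠ j) && dominatesA (scores.getD j []) (scores.getD i []))
      if !dominated then res ++ [elements.getD i 0] else res) []

-- ===== PORT B =====
def dominatesB (a b : List Bool) : Bool :=
  (a != b) && (a.zip b).all (fun p => p.1 || !p.2)

-- one loop iteration of Source B: skip the newcomer if a survivor dominates it,
-- otherwise evict survivors it dominates and append it
def ndStep (res : List (Int × List Bool)) (p : Int × List Bool) : List (Int × List Bool) :=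
  if res.any (fun q => dominatesB q.2 p.2) then res
  else res.filter (fun q => !dominatesB p.2 q.2) ++ [p]

def non_dominated_alt (elements : List Int) (scores : List (List Bool)) : List Int :=
  if elements.length = 0 then elements
  else ((elements.zip scores).foldl ndStep []).map Prod.fst

-- ===== PRECONDITION & SPEC =====
-- Pre_ excludes inputs where Python A raises or its value is an indexing accident: a
-- length mismatch fails the assert (unless elements is empty, which returns before the
-- assert), and ragged score rows make dominates index past the end of a row — usually
-- an IndexError, except when an early `return False` or an `and` short-circuit skips
-- the out-of-range read; those lucky ragged inputs are excluded too.
def Pre_non_dominated (elements : List Int) (scores : List (List Bool)) : Prop :=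
  elements = [] ∨
    (elements.length = scores.length ∧ ∀ r ∈ scores, ∀ r' ∈ scores, r.length = r'.length)
instance (elements : List Int) (scores : List (List Bool)) : Decidable (Pre_non_dominated elements scores) := by
  unfold Pre_non_dominated; infer_instance

def pvWitness_non_dominated : List Int × List (List Bool) :=
  ([1, 2], [[true, false], [false, true]])

def Spec_non_dominated (elements : List Int) (scores : List (List Bool)) (out : List Int) : Prop := out = non_dominated_alt elements scores
instance (elements : List Int) (scores : List (List Bool)) (out : List Int) : Decidable (Spec_non_dominated elements scores out) := by unfold Spec_non_dominated; infer_instance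

-- ===== CLAIM (what is proved, stated in full; the proofs are below) =====
def Claim_equal_non_dominated : Prop := ∀ (elements : List Int) (scores : List (List Bool)), Dom_non_dominated elements scores → Pre_non_dominated elements scores → Spec_non_dominated elements scores (non_dominated elements scores)

-- ===== LEMMAS AND PROOFS =====

-- A's dominates equals B's dominates on equal-length rows
lemma dominatesAux_eq (a : List Bool) : ∀ (b : List Bool) (eq : Bool), a.length = b.length →
    dominatesAux a b eq = ((a.zip b).all (fun p => p.1 || !p.2) && !(eq && a == b)) := by
  induction a with
  | nil => intro b eq h; cases b with
    | nil => cases eq <;> simp [dominatesAux]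
    | cons y b => simp at h
  | cons x a ih =>
    intro b eq h
    cases b with
    | nil => simp at h
    | cons y b =>
      simp only [List.length_cons, Nat.add_right_cancel_iff] at h
      cases x <;> cases y <;>
        simp [dominatesAux, ih b _ h, Bool.and_comm]

lemma dominatesA_eq_B (a b : List Bool) (h : a.length = b.length) :
    dominatesA a b = dominatesB a b := by
  simp [dominatesA, dominatesB, dominatesAux_eq a b true h, bne, Bool.and_comm]

-- pointwise coverage facts
lemma zip_all_antisymm : ∀ (a b : List Bool), a.length = b.length →
    (a.zip b).all (fun p => p.1 || !p.2) = true →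
    (b.zip a).all (fun p => p.1 || !p.2) = true → a = b := by
  intro a
  induction a with
  | nil => intro b h _ _; cases b <;> simp_all
  | cons x a ih =>
    intro b h h1 h2
    cases b with
    | nil => simp at h
    | cons y b =>
      simp only [List.length_cons, Nat.add_right_cancel_iff] at h
      simp only [List.zip_cons_cons, List.all_cons, Bool.and_eq_true] at h1 h2
      have := ih b h h1.2 h2.2
      cases x <;> cases y <;> simp_all

lemma zip_all_trans : ∀ (a b c : List Bool), a.length = b.length → b.length = c.length →
    (a.zip b).all (fun p => p.1 || !p.2) = true →
    (b.zip c).all (fun p => p.1 || !p.2) = true →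
    (a.zip c).all (fun p => p.1 || !p.2) = true := by
  intro a
  induction a with
  | nil => intro b c _ _ _ _; simp
  | cons x a ih =>
    intro b c hab hbc h1 h2
    cases b with
    | nil => simp at hab
    | cons y b =>
      cases c with
      | nil => simp at hbc
      | cons z c =>
        simp only [List.length_cons, Nat.add_right_cancel_iff] at hab hbc
        simp only [List.zip_cons_cons, List.all_cons, Bool.and_eq_true] at h1 h2 ⊢
        exact ⟨by cases x <;> cases y <;> cases z <;> simp_all, ih b c hab hbc h1.2 h2.2⟩

lemma dominatesB_irrefl (a : List Bool) : dominatesB a a = false := by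
  simp [dominatesB]

lemma dominatesB_trans {a b c : List Bool} (hab : a.length = b.length) (hbc : b.length = c.length)
    (h1 : dominatesB a b = true) (h2 : dominatesB b c = true) : dominatesB a c = true := by
  simp only [dominatesB, Bool.and_eq_true, bne_iff_ne, ne_eq] at *
  refine ⟨?_, zip_all_trans a b c hab hbc h1.2 h2.2⟩
  intro hac
  subst hac
  exact h1.1 (zip_all_antisymm a b hab h1.2 h2.2)

-- survivors of a processed prefix
def surv (l : List (Int × List Bool)) : List (Int × List Bool) :=
  l.filter (fun p => !(l.any (fun r => dominatesB r.2 p.2)))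

lemma exists_max (m : Nat) : ∀ (l : List (Int × List Bool)),
    (∀ p ∈ l, p.2.length = m) → l ≠ [] →
    ∃ x ∈ l, ∀ y ∈ l, dominatesB y.2 x.2 = false := by
  intro l
  induction l with
  | nil => intro _ h; exact absurd rfl h
  | cons a t ih =>
    intro hU _
    cases t with
    | nil =>
      exact ⟨a, List.mem_cons_self, by
        intro y hy
        simp only [List.mem_cons, List.not_mem_nil, or_false] at hy
        subst hy; exact dominatesB_irrefl _⟩
    | cons b t' =>
      obtain ⟨x, hx, hmax⟩ := ih (fun p hp => hU p (List.mem_cons_of_mem _ hp)) (by simp)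
      by_cases had : dominatesB a.2 x.2 = true
      · refine ⟨a, List.mem_cons_self, ?_⟩
        intro y hy
        rcases List.mem_cons.mp hy with rfl | hy'
        · exact dominatesB_irrefl _
        · by_contra hne
          have hyx : dominatesB y.2 x.2 = true :=
            dominatesB_trans
              (by rw [hU y hy, hU a List.mem_cons_self])
              (by rw [hU a List.mem_cons_self, hU x (List.mem_cons_of_mem _ hx)])
              (Bool.ne_false_iff.mp hne) had
          exact absurd hyx (by simp [hmax y hy'])
      · refine ⟨x, List.mem_cons_of_mem _ hx, ?_⟩
        intro y hy
        rcases List.mem_cons.mp hy with rfl | hy'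
        · exact Bool.eq_false_iff.mpr had
        · exact hmax y hy'

lemma dominator_in_surv (m : Nat) (l : List (Int × List Bool))
    (hU : ∀ p ∈ l, p.2.length = m) {t r : Int × List Bool} (ht : t.2.length = m) (hr : r ∈ l)
    (hD : dominatesB r.2 t.2 = true) :
    ∃ s ∈ surv l, dominatesB s.2 t.2 = true := by
  set Dl := l.filter (fun q => dominatesB q.2 t.2) with hDl
  have hrD : r ∈ Dl := List.mem_filter.mpr ⟨hr, hD⟩
  obtain ⟨x, hx, hmax⟩ := exists_max m Dl
    (fun p hp => hU p (List.mem_of_mem_filter hp)) (List.ne_nil_of_mem hrD)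
  have hxl : x ∈ l := List.mem_of_mem_filter hx
  have hxt : dominatesB x.2 t.2 = true := (List.mem_filter.mp hx).2
  refine ⟨x, List.mem_filter.mpr ⟨hxl, ?_⟩, hxt⟩
  simp only [Bool.not_eq_eq_eq_not, Bool.not_true, List.any_eq_false]
  intro q hq
  by_contra hne
  have hqx : dominatesB q.2 x.2 = true := hne
  have hqt : dominatesB q.2 t.2 = true :=
    dominatesB_trans (by rw [hU q hq, hU x hxl]) (by rw [hU x hxl, ht]) hqx hxt
  have : q ∈ Dl := List.mem_filter.mpr ⟨hq, hqt⟩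
  exact absurd hqx (by simp [hmax q this])

lemma step_surv (m : Nat) (P : List (Int × List Bool)) (p : Int × List Bool)
    (hU : ∀ q ∈ P ++ [p], q.2.length = m) :
    ndStep (surv P) p = surv (P ++ [p]) := by
  have hUP : ∀ q ∈ P, q.2.length = m := fun q hq => hU q (List.mem_append_left _ hq)
  have hUp : p.2.length = m := hU p (List.mem_append_right _ List.mem_cons_self)
  by_cases h : (surv P).any (fun q => dominatesB q.2 p.2) = true
  · -- a survivor dominates p: nothing changes
    obtain ⟨s, hs, hsp⟩ := List.any_eq_true.mp h
    have hsP : s ∈ P := List.mem_of_mem_filter hs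
    have hsn : ∀ r ∈ P, dominatesB r.2 s.2 = false := by
      have := (List.mem_filter.mp hs).2
      simpa using this
    have hkeep : ∀ q ∈ P,
        (!( (P ++ [p]).any (fun r => dominatesB r.2 q.2))) =
        (!(P.any (fun r => dominatesB r.2 q.2))) := by
      intro q hq
      simp only [List.any_append, List.any_cons, List.any_nil, Bool.or_false]
      by_cases hPq : P.any (fun r => dominatesB r.2 q.2) = true
      · simp [hPq]
      · have hpq : dominatesB p.2 q.2 = false := by
          by_contra hne
          have hsq : dominatesB s.2 q.2 = true :=
            dominatesB_trans (by rw [hUP s hsP, hUp]) (by rw [hUp, hUP q hq]) hsp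
              (Bool.ne_false_iff.mp hne)
          exact absurd (List.any_eq_true.mpr ⟨s, hsP, hsq⟩) hPq
        simp [hpq]
    have hpdrop : (!( (P ++ [p]).any (fun r => dominatesB r.2 p.2))) = false := by
      simp only [Bool.not_eq_eq_eq_not, Bool.not_false, List.any_append]
      exact Bool.or_eq_true_iff.mpr (Or.inl (List.any_eq_true.mpr ⟨s, hsP, hsp⟩))
    rw [ndStep, if_pos h]
    unfold surv
    rw [List.filter_append, List.filter_congr hkeep, List.filter_singleton, hpdrop]
    exact (List.append_nil _).symm
  · -- no survivor dominates p: evict what p dominates, append p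
    have hnone : ∀ r ∈ P, dominatesB r.2 p.2 = false := by
      intro r hr
      by_contra hne
      obtain ⟨s, hs, hsp⟩ := dominator_in_surv m P hUP hUp hr (Bool.ne_false_iff.mp hne)
      exact h (List.any_eq_true.mpr ⟨s, hs, hsp⟩)
    have hpkeep : (!( (P ++ [p]).any (fun r => dominatesB r.2 p.2))) = true := by
      simp only [Bool.not_eq_eq_eq_not, Bool.not_true, List.any_append, List.any_cons,
        List.any_nil, Bool.or_false, Bool.or_eq_false_iff]
      exact ⟨List.any_eq_false.mpr (fun r hr => by simp [hnone r hr]), dominatesB_irrefl _⟩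
    have hsplit : ∀ q ∈ P,
        (!( (P ++ [p]).any (fun r => dominatesB r.2 q.2))) =
        ((!dominatesB p.2 q.2) && (!(P.any (fun r => dominatesB r.2 q.2)))) := by
      intro q hq
      simp only [List.any_append, List.any_cons, List.any_nil, Bool.or_false]
      cases hP : P.any (fun r => dominatesB r.2 q.2) <;>
        cases hpq : dominatesB p.2 q.2 <;> simp
    rw [ndStep, if_neg h]
    unfold surv
    rw [List.filter_filter, List.filter_append, List.filter_congr hsplit,
      List.filter_singleton, hpkeep]
    rfl

lemma fold_surv (m : Nat) : ∀ (l P : List (Int × List Bool)),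
    (∀ q ∈ P ++ l, q.2.length = m) →
    l.foldl ndStep (surv P) = surv (P ++ l) := by
  intro l
  induction l with
  | nil => intro P hU; simp
  | cons p l ih =>
    intro P hU
    have h1 : ∀ q ∈ P ++ [p], q.2.length = m := by
      intro q hq
      rcases List.mem_append.mp hq with h | h
      · exact hU q (List.mem_append_left _ h)
      · simp only [List.mem_singleton] at h
        exact hU q (List.mem_append_right _ (h ▸ List.mem_cons_self))
    have h2 : ∀ q ∈ (P ++ [p]) ++ l, q.2.length = m := by
      intro q hq
      rcases List.mem_append.mp hq with h | h
      · exact h1 q h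
      · exact hU q (List.mem_append_right _ (List.mem_cons_of_mem _ h))
    calc (p :: l).foldl ndStep (surv P)
        = l.foldl ndStep (ndStep (surv P) p) := rfl
      _ = l.foldl ndStep (surv (P ++ [p])) := by rw [step_surv m P p h1]
      _ = surv ((P ++ [p]) ++ l) := ih (P ++ [p]) h2
      _ = surv (P ++ p :: l) := by simp

-- B's survivor fold in closed form, with the domination pool rewritten to `scores`
lemma B_closed (es : List Int) (ss : List (List Bool)) (hlen : es.length = ss.length)
    (hU : ∀ r ∈ ss, ∀ r' ∈ ss, r.length = r'.length) :
    (es.zip ss).foldl ndStep [] =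
      (es.zip ss).filter (fun p => !(ss.any (fun t => dominatesB t p.2))) := by
  have hsnd : ∀ p ∈ es.zip ss, p.2 ∈ ss := fun p hp => (List.of_mem_zip hp).2
  have hU' : ∀ p ∈ es.zip ss, p.2.length = (ss.headD []).length := by
    intro p hp
    cases ss with
    | nil => simp [List.zip_nil_right] at hp
    | cons s0 ss' => simpa using hU _ (hsnd p hp) s0 List.mem_cons_self
  have h0 := fold_surv (ss.headD []).length (es.zip ss) [] (by simpa using hU')
  simp only [List.nil_append] at h0
  rw [show surv ([] : List (Int × List Bool)) = [] from rfl] at h0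
  rw [h0]
  unfold surv
  apply List.filter_congr
  intro p _
  congr 1
  have hm := List.any_map (f := Prod.snd) (l := es.zip ss)
    (p := fun t => dominatesB t p.2)
  rw [List.map_snd_zip hlen.ge] at hm
  rw [hm]
  rfl

-- A's inner any over indices j ≠ i equals domination by some row of scores
lemma A_inner (es : List Int) (ss : List (List Bool)) (hlen : es.length = ss.length)
    (hU : ∀ r ∈ ss, ∀ r' ∈ ss, r.length = r'.length) (i : Nat) (hi : i < es.length) :
    ((List.range es.length).any (fun j =>
        decide (i ≠ j) && dominatesA (ss.getD j []) (ss.getD i []))) =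
      ss.any (fun t => dominatesB t (ss.getD i [])) := by
  have hi' : i < ss.length := hlen ▸ hi
  have hgi : ss.getD i [] = ss[i] := List.getD_eq_getElem ss [] hi'
  have hmem_i : ss.getD i [] ∈ ss := hgi ▸ List.getElem_mem hi'
  rw [Bool.eq_iff_iff]
  simp only [List.any_eq_true, List.mem_range, Bool.and_eq_true, decide_eq_true_eq]
  constructor
  · rintro ⟨j, hj, hne, hdom⟩
    have hj' : j < ss.length := hlen ▸ hj
    have hgj : ss.getD j [] = ss[j] := List.getD_eq_getElem ss [] hj'
    have hmem_j : ss.getD j [] ∈ ss := hgj ▸ List.getElem_mem hj'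
    exact ⟨ss.getD j [], hmem_j, by
      rw [← dominatesA_eq_B _ _ (hU _ hmem_j _ hmem_i)]; exact hdom⟩
  · rintro ⟨t, ht, hdom⟩
    obtain ⟨j, hj, hjt⟩ := List.mem_iff_getElem.mp ht
    refine ⟨j, hlen ▸ hj, ?_, ?_⟩
    · rintro rfl
      have h2 : dominatesB t t = true := by rwa [hgi, hjt] at hdom
      simp [dominatesB_irrefl] at h2
    · have hgj : ss.getD j [] = ss[j] := List.getD_eq_getElem ss [] hj
      have hmem_t : t ∈ ss := ht
      rw [hgj, hjt, dominatesA_eq_B _ _ (hU _ hmem_t _ hmem_i)]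
      exact hdom

lemma range_zip (c : List Bool → Bool) : ∀ (es : List Int) (ss : List (List Bool)),
    es.length = ss.length →
    (((List.range es.length).filter (fun i => c (ss.getD i []))).map
        (fun i => es.getD i 0)) =
      ((es.zip ss).filter (fun p => c p.2)).map Prod.fst := by
  intro es
  induction es with
  | nil => intro ss h; simp
  | cons e es ih =>
    intro ss h
    cases ss with
    | nil => simp at h
    | cons t ss =>
      simp only [List.length_cons, Nat.add_right_cancel_iff] at h
      simp only [List.length_cons, List.range_succ_eq_map, List.filter_cons,
        List.getD_cons_zero, List.filter_map, List.map_map, List.zip_cons_cons,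
        Function.comp_def, List.getD_cons_succ]
      have ih' := ih ss h
      simp only [List.getD_eq_getElem?_getD] at ih'
      by_cases hc : c t = true
      · simp [hc, Function.comp_def, List.getElem?_cons_succ, ih']
      · simp [hc, Function.comp_def, List.getElem?_cons_succ, ih']

-- ===== VERDICT (by name: the statement is the Claim_ definition above) =====
theorem non_dominated_spec : Claim_equal_non_dominated := by
  intro es ss _ hPre
  unfold Spec_non_dominated
  rcases hPre with rfl | ⟨hlen, hU⟩
  · rfl
  · unfold non_dominated non_dominated_alt
    by_cases hes : es.length = 0
    · rw [if_pos hes, if_pos hes]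
    · rw [if_neg hes, if_neg hes]
      have hA : (List.range es.length).foldl (fun res i =>
          let dominated := (List.range es.length).any (fun j =>
            decide (i ≠ j) && dominatesA (ss.getD j []) (ss.getD i []))
          if !dominated then res ++ [es.getD i 0] else res) [] =
          [] ++ ((List.range es.length).filter (fun i =>
            !((List.range es.length).any (fun j =>
              decide (i ≠ j) && dominatesA (ss.getD j []) (ss.getD i []))))).map
            (fun i => es.getD i 0) :=
        PySem.List.foldl_append_if _ _ _ []
      rw [hA, List.nil_append]
      rw [List.filter_congr (q := fun i =>
          !(ss.any (fun t => dominatesB t (ss.getD i []))))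
        (fun i hi => by
          rw [A_inner es ss hlen hU i (List.mem_range.mp hi)])]
      have hz := range_zip (fun s => !(ss.any (fun t => dominatesB t s))) es ss hlen
      simp only [] at hz
      rw [hz, B_closed es ss hlen hU]
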